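-- pv_equiv track=rewrite | github.com/stringertheory/advent-of-code | 2020/18.py | innermost
-- ===== SOURCE A (Python) =====
-- import collections
--
-- def innermost(ex):
--     depth = collections.defaultdict(list)
--     counter = 0
--     for index, char in enumerate(ex):
--         if char == '(':
--             counter += 1
--             depth[counter].append([index, None])
--         elif char == ')':
--             depth[counter][-1][1] = index + 1
--             counter -= 1
--     if depth:
--         return depth[max(depth.keys())]
--     else:
--         return []
-- ===== SOURCE B (Python) =====
-- def innermost(ex):
--     spans = []  # (depth, [start, end]) appended as each group closes; groups at the
--                 # deepest level never nest, so there this is also opening order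
--
--     def group(i, depth):
--         # ex[i] == '(': walk this group's body, record it, return the index just past it
--         start = i
--         i += 1
--         while i < len(ex) and ex[i] != ')':
--             if ex[i] == '(':
--                 i = group(i, depth + 1)
--             else:
--                 i += 1
--         end = i + 1 if i < len(ex) else None  # None: the group never closes
--         spans.append((depth, [start, end]))
--         return end if end is not None else len(ex)
--
--     i = 0
--     while i < len(ex):
--         if ex[i] == '(':
--             i = group(i, 1)
--         elif ex[i] == ')':
--             raise ValueError("unmatched ')' at index %d" % i)
--         else:
--             i += 1
--     if not spans:
--         return []
--     maxd = max(d for d, _ in spans)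
--     return [span for d, span in spans if d == maxd]
-- ===== Notes on version B (the rewrite author's own statement) =====
-- stated objective: alternative
-- what changed: Replaces the depth-keyed defaultdict plus counter scan with a recursive-descent parser: a recursive group() consumes one parenthesis group (recursing for nested ones) and records (depth, [start, end]) as each group closes, then a single max-and-filter picks the deepest spans.
-- outside the precondition, e.g. on innermost('('): A returns [[0, None]], B returns [[0, None]]; on innermost('a(b(c'): A returns [[3, None]], B returns [[3, None]]
import Mathlib
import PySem

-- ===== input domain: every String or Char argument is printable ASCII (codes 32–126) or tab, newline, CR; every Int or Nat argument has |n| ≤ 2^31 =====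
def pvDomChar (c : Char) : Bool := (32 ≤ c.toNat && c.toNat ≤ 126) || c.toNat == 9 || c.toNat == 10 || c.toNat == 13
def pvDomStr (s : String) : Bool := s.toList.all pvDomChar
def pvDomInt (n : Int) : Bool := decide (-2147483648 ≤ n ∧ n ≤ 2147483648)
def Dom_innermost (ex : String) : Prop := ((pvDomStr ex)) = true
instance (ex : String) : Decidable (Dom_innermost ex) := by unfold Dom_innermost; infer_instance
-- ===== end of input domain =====

-- B replaces A's depth-keyed dict-and-counter scan by a recursive-descent parser (a recursive
-- group walker recording each group as it closes, then max-and-filter): an alternative algorithm of the same cost.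


-- ===== PORT A =====
-- depth[counter][-1][1] = index + 1 : mutate the last span's end; [] = Python's IndexError case (excluded by Pre_)
def pvSetLast : List (Int × Option Int) → Int → List (Int × Option Int)
  | [], _ => []
  | [(s, _)], v => [(s, some v)]
  | x :: y :: t, v => x :: pvSetLast (y :: t) v

-- the for-loop over enumerate(ex): state = (depth : defaultdict(list), counter)
def loopA : List (Int × Char) → PySem.Dict Int (List (Int × Option Int)) → Int →
    PySem.Dict Int (List (Int × Option Int)) × Int
  | [], dict, c => (dict, c)
  | (i, ch) :: rest, dict, c =>
    if ch = '(' then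
      loopA rest (dict.insert (c + 1) ((dict.getD (c + 1) []) ++ [(i, none)])) (c + 1)
    else if ch = ')' then
      loopA rest (dict.insert c (pvSetLast (dict.getD c []) (i + 1))) (c - 1)
    else loopA rest dict c

def innermost (ex : String) : List (List Int) :=
  let st := loopA (PySem.List.enumerate ex.toList) PySem.Dict.empty 0
  match PySem.List.max? st.1.keys (fun k => k) with   -- `if depth:` + max(depth.keys())
  | none => []
  | some m => (st.1.getD m []).map (fun p => [p.1, p.2.getD 0])
      -- the spans are 2-lists [start, end]; under Pre_ every end is `some`, `.getD 0` only totalizes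

-- ===== PORT B =====
-- Source B's recursive `group(i, depth)`: walks one group's body on the enumerated suffix after its
-- '(' (recursing at a nested '('), appends (depth, start, end) when the group closes (end = none
-- if the string runs out), and returns the suffix past the group. The subtype on the remainder
-- only carries the termination bound (the remainder never grows); it adds no computation.
def grp : (l : List (Int × Char)) → Int → Int → List (Int × Int × Option Int) →
    List (Int × Int × Option Int) × {r : List (Int × Char) // r.length ≤ l.length}
  | [], depth, start, spans => (spans ++ [(depth, start, none)], ⟨[], by simp⟩)
  | (i, ch) :: rest, depth, start, spans =>
    if ch = ')' then (spans ++ [(depth, start, some (i + 1))], ⟨rest, by simp⟩)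
    else if ch = '(' then
      match grp rest (depth + 1) i spans with
      | (sp1, ⟨r1, hr1⟩) =>
        match grp r1 depth start sp1 with
        | (sp2, ⟨r2, hr2⟩) => (sp2, ⟨r2, by simp only [List.length_cons]; omega⟩)
    else
      match grp rest depth start spans with
      | (sp1, ⟨r1, hr1⟩) => (sp1, ⟨r1, by simp only [List.length_cons]; omega⟩)
termination_by l => l.length
decreasing_by
  · simp only [List.length_cons]; omega
  · simp only [List.length_cons]; omega
  · simp only [List.length_cons]; omega

-- Source B's top-level while loop: scan at depth 0, entering a group at '('; a stray ')' at the top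
-- level is Python's `raise ValueError` (excluded by Pre_), modelled as none
def topWalk : List (Int × Char) → List (Int × Int × Option Int) →
    Option (List (Int × Int × Option Int))
  | [], spans => some spans
  | (i, ch) :: rest, spans =>
    if ch = '(' then
      match grp rest 1 i spans with
      | (sp1, ⟨r1, _hr1⟩) => topWalk r1 sp1
    else if ch = ')' then none
    else topWalk rest spans
termination_by l => l.length
decreasing_by
  · simp only [List.length_cons]; omega
  · simp only [List.length_cons]; omega

def innermost_alt (ex : String) : List (List Int) :=
  match topWalk (PySem.List.enumerate ex.toList) [] with
  | none => []      -- Python B raises ValueError here (outside Pre_)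
  | some spans =>
    if spans = [] then []           -- `if not spans: return []`
    else
      match PySem.List.max? (spans.map (fun r => r.1)) (fun d => d) with  -- max(d for d, _ in spans)
      | none => []                  -- unreachable: spans ≠ []
      | some maxd =>
          (spans.filter (fun r => r.1 == maxd)).map (fun r => [r.2.1, r.2.2.getD 0])
          -- under Pre_ every end at the deepest level is `some`, `.getD 0` only totalizes

-- ===== PRECONDITION & SPEC =====
-- paren balance of a list: count of opening minus count of closing parens
def pvBalCnt (l : List Char) : Int := (l.count '(' : Int) - (l.count ')' : Int)

-- Pre_ excludes inputs where A raises IndexError (a prefix with more closing than opening parens) and inputs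
-- whose deepest '(' is never closed (no prefix strictly deeper than the whole string), where A's
-- returned spans contain None, which is not an int.
def Pre_innermost (ex : String) : Prop :=
  (∀ n ∈ List.range (ex.toList.length + 1), 0 ≤ pvBalCnt (ex.toList.take n)) ∧
    ('(' ∉ ex.toList ∨
      ∃ n ∈ List.range (ex.toList.length + 1), pvBalCnt ex.toList < pvBalCnt (ex.toList.take n))
instance (ex : String) : Decidable (Pre_innermost ex) := by unfold Pre_innermost; infer_instance

def pvWitness_innermost : String := "(1 + (2 * 3)) + (4)"

def Spec_innermost (ex : String) (out : List (List Int)) : Prop := out = innermost_alt ex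
instance (ex : String) (out : List (List Int)) : Decidable (Spec_innermost ex out) := by unfold Spec_innermost; infer_instance

-- ===== CLAIM (what is proved, stated in full; the proofs are below) =====
def Claim_equal_innermost : Prop :=
  ∀ (ex : String), Dom_innermost ex → Pre_innermost ex → Spec_innermost ex (innermost ex)

-- ===== LEMMAS AND PROOFS =====

-- proof-side scans: prefix-balance validity, depth after a segment, running maximum depth
def pvBal : List Char → Int → Bool
  | [], _ => true
  | ch :: rest, d =>
    if ch = '(' then pvBal rest (d + 1)
    else if ch = ')' then decide (0 < d) && pvBal rest (d - 1)
    else pvBal rest d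

def dAfter : List Char → Int → Int
  | [], d => d
  | ch :: rest, d =>
    if ch = '(' then dAfter rest (d + 1)
    else if ch = ')' then dAfter rest (d - 1)
    else dAfter rest d

def pvDMax : List Char → Int → Int → Int
  | [], _, m => m
  | ch :: rest, d, m =>
    if ch = '(' then pvDMax rest (d + 1) (max m (d + 1))
    else if ch = ')' then pvDMax rest (d - 1) m
    else pvDMax rest d m

-- A's per-depth history: what depth[k] holds after processing the enumerated tail from depth d
def specAt (k : Int) : List (Int × Char) → Int → List (Int × Option Int) → List (Int × Option Int)
  | [], _, acc => acc
  | (i, ch) :: rest, d, acc =>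
    if ch = '(' then specAt k rest (d + 1) (if d + 1 = k then acc ++ [(i, none)] else acc)
    else if ch = ')' then specAt k rest (d - 1) (if d = k then pvSetLast acc (i + 1) else acc)
    else specAt k rest d acc

-- [1, 2, …, m] for m ≥ 0
def krI (m : Int) : List Int := (List.range m.toNat).map (fun (j : Nat) => (j : Int) + 1)

-- B's records at one depth, in list order (the shape A's depth[k] takes)
def fAt (k : Int) (sp : List (Int × Int × Option Int)) : List (Int × Option Int) :=
  (sp.filter (fun r => r.1 == k)).map (fun r => (r.2.1, r.2.2))

theorem lemA_getD : ∀ (es : List (Int × Char)) (dict : PySem.Dict Int (List (Int × Option Int)))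
    (c k : Int), ((loopA es dict c).1).getD k [] = specAt k es c (dict.getD k []) := by
  intro es
  induction es with
  | nil => intro dict c k; rfl
  | cons p rest ih =>
    obtain ⟨i, ch⟩ := p
    intro dict c k
    simp only [loopA, specAt]
    by_cases h1 : ch = '('
    · simp only [if_pos h1]
      rw [ih, PySem.Dict.getD_insert]
      by_cases hk : k = c + 1
      · subst hk; simp
      · simp [hk, Ne.symm hk]
    · by_cases h2 : ch = ')'
      · simp only [if_neg h1, if_pos h2]
        rw [ih, PySem.Dict.getD_insert]
        by_cases hk : k = c
        · subst hk; simp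
        · simp [hk, Ne.symm hk]
      · simp only [if_neg h1, if_neg h2]
        exact ih dict c k

theorem mem_krI {m x : Int} (hm : 0 ≤ m) : x ∈ krI m ↔ 1 ≤ x ∧ x ≤ m := by
  unfold krI
  constructor
  · intro h
    obtain ⟨j, hj, rfl⟩ := List.mem_map.1 h
    rw [List.mem_range] at hj
    constructor <;> omega
  · rintro ⟨h1, h2⟩
    exact List.mem_map.2 ⟨(x - 1).toNat, List.mem_range.2 (by omega), by omega⟩

theorem krI_succ {m : Int} (hm : 0 ≤ m) : krI (m + 1) = krI m ++ [m + 1] := by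
  have h : (m + 1).toNat = m.toNat + 1 := by omega
  simp [krI, h, List.range_succ]
  omega

theorem pvDMax_ge : ∀ (cs : List Char) (d m : Int), m ≤ pvDMax cs d m := by
  intro cs
  induction cs with
  | nil => intro d m; simp [pvDMax]
  | cons ch rest ih =>
    intro d m
    simp only [pvDMax]
    split_ifs with h1 h2
    · exact le_trans (le_max_left m (d + 1)) (ih (d + 1) (max m (d + 1)))
    · exact ih (d - 1) m
    · exact ih d m

theorem lemA_keys : ∀ (es : List (Int × Char)) (c m : Int)
    (dict : PySem.Dict Int (List (Int × Option Int))),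
    pvBal (es.map (·.2)) c = true → dict.keys = krI m → 0 ≤ c → c ≤ m →
    (loopA es dict c).1.keys = krI (pvDMax (es.map (·.2)) c m) := by
  intro es
  induction es with
  | nil => intro c m dict _ hkeys _ _; simpa [loopA, pvDMax] using hkeys
  | cons p rest ih =>
    obtain ⟨i, ch⟩ := p
    intro c m dict hbal hkeys h0 hcm
    by_cases h1 : ch = '('
    · simp only [List.map_cons, pvBal, loopA, pvDMax, h1, if_pos] at hbal ⊢
      by_cases hle : c + 1 ≤ m
      · have hcont : dict.contains (c + 1) = true := by
          rw [PySem.Dict.contains_eq_decide_mem_keys, hkeys, decide_eq_true_iff]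
          exact (mem_krI (by omega)).2 ⟨by omega, hle⟩
        have hmax : max m (c + 1) = m := by omega
        rw [hmax]
        exact ih (c + 1) m _ hbal
          (by rw [PySem.Dict.keys_insert_of_contains _ _ hcont]; exact hkeys)
          (by omega) hle
      · have hcont : dict.contains (c + 1) = false := by
          rw [PySem.Dict.contains_eq_decide_mem_keys, hkeys, decide_eq_false_iff_not]
          intro hmem
          exact absurd ((mem_krI (by omega)).1 hmem).2 hle
        have hmax : max m (c + 1) = m + 1 := by omega
        have hcm' : c = m := by omega
        rw [hmax]
        refine ih (c + 1) (m + 1) _ hbal ?_ (by omega) (by omega)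
        rw [PySem.Dict.keys_insert_of_not_contains _ _ hcont, hkeys,
          krI_succ (by omega), hcm']
    · by_cases h2 : ch = ')'
      · simp [List.map_cons, pvBal, loopA, pvDMax, h2] at hbal ⊢
        obtain ⟨hpos, hbal'⟩ := hbal
        have hcont : dict.contains c = true := by
          rw [PySem.Dict.contains_eq_decide_mem_keys, hkeys, decide_eq_true_iff]
          exact (mem_krI (by omega)).2 ⟨by omega, hcm⟩
        exact ih (c - 1) m _ hbal'
          (by rw [PySem.Dict.keys_insert_of_contains _ _ hcont]; exact hkeys)
          (by omega) (by omega)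
      · simp only [List.map_cons, pvBal, loopA, pvDMax, if_neg h1, if_neg h2] at hbal ⊢
        exact ih c m dict hbal hkeys h0 hcm

theorem max?_krI {m : Int} (hm : 1 ≤ m) : PySem.List.max? (krI m) (fun k => k) = some m := by
  have hmem : m ∈ krI m := (mem_krI (by omega)).2 ⟨hm, le_refl m⟩
  cases hmax : PySem.List.max? (krI m) (fun k => k) with
  | none =>
    rw [PySem.List.max?_eq_none_iff] at hmax
    rw [hmax] at hmem
    simp at hmem
  | some x =>
    have hx : x ∈ krI m := PySem.List.max?_mem hmax
    have hxle : x ≤ m := ((mem_krI (by omega)).1 hx).2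
    have hmle : m ≤ x := PySem.List.max?_isMax hmax m hmem
    congr 1
    omega

theorem pvSetLast_append_singleton (l : List (Int × Option Int)) (s : Int) (e : Option Int)
    (v : Int) : pvSetLast (l ++ [(s, e)]) v = l ++ [(s, some v)] := by
  induction l with
  | nil => rfl
  | cons x t ih =>
    cases t with
    | nil => rfl
    | cons y t' => simpa [pvSetLast] using ih

theorem pvBalCnt_cons (c : Char) (l : List Char) :
    pvBalCnt (c :: l) =
      (if c = '(' then 1 else if c = ')' then -1 else 0) + pvBalCnt l := by
  by_cases h1 : c = '('
  · subst h1
    simp [pvBalCnt]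
    ring
  · by_cases h2 : c = ')'
    · subst h2
      simp [pvBalCnt, h1]
      ring
    · simp [pvBalCnt, h1, h2]

theorem pvBal_of : ∀ (cs : List Char) (d : Int), 0 ≤ d →
    (∀ n ∈ List.range (cs.length + 1), 0 ≤ d + pvBalCnt (cs.take n)) →
    pvBal cs d = true := by
  intro cs
  induction cs with
  | nil => intro d _ _; rfl
  | cons c t ih =>
    intro d h0 h
    have hstep : ∀ n ∈ List.range (t.length + 1), 0 ≤
        (d + (if c = '(' then 1 else if c = ')' then -1 else 0)) + pvBalCnt (t.take n) := by
      intro n hn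
      rw [List.mem_range] at hn
      have := h (n + 1) (List.mem_range.2 (by simp; omega))
      rw [List.take_succ_cons, pvBalCnt_cons] at this
      omega
    by_cases h1 : c = '('
    · simp only [pvBal, h1, if_pos]
      exact ih (d + 1) (by omega) (by simpa [h1] using hstep)
    · by_cases h2 : c = ')'
      · have hd1 : 0 ≤ d - 1 := by
          have := hstep 0 (List.mem_range.2 (by omega))
          simp [h2, pvBalCnt] at this
          omega
        simp [pvBal, h2, ih (d - 1) hd1 (by simpa [h1, h2] using hstep)]
        omega
      · simp only [pvBal, if_neg h1, if_neg h2]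
        exact ih d h0 (by simpa [h1, h2] using hstep)

theorem pvDMax_max : ∀ (cs : List Char) (d a b : Int),
    pvDMax cs d (max a b) = max a (pvDMax cs d b) := by
  intro cs
  induction cs with
  | nil => intro d a b; rfl
  | cons ch rest ih =>
    intro d a b
    simp only [pvDMax]
    split_ifs with h1 h2
    · rw [max_assoc, ih]
    · exact ih (d - 1) a b
    · exact ih d a b

theorem pvDMax_idem (cs : List Char) : pvDMax cs 0 (pvDMax cs 0 0) = pvDMax cs 0 0 := by
  have h0 : 0 ≤ pvDMax cs 0 0 := pvDMax_ge cs 0 0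
  have h := pvDMax_max cs 0 (pvDMax cs 0 0) 0
  rw [max_eq_left h0] at h
  rw [h, max_self]

theorem dAfter_append (xs ys : List Char) (d : Int) :
    dAfter (xs ++ ys) d = dAfter ys (dAfter xs d) := by
  induction xs generalizing d with
  | nil => rfl
  | cons c t ih => simp only [List.cons_append, dAfter]; split_ifs <;> exact ih _

theorem pvBal_append (xs ys : List Char) (d : Int) :
    pvBal (xs ++ ys) d = (pvBal xs d && pvBal ys (dAfter xs d)) := by
  induction xs generalizing d with
  | nil => simp [pvBal, dAfter]
  | cons c t ih =>
    simp only [List.cons_append, pvBal, dAfter]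
    split_ifs
    · exact ih _
    · rw [ih, Bool.and_assoc]
    · exact ih _

theorem specAt_append (k : Int) (xs ys : List (Int × Char)) (d : Int)
    (acc : List (Int × Option Int)) :
    specAt k (xs ++ ys) d acc = specAt k ys (dAfter (xs.map (·.2)) d) (specAt k xs d acc) := by
  induction xs generalizing d acc with
  | nil => rfl
  | cons p t ih =>
    obtain ⟨i, ch⟩ := p
    simp only [List.cons_append, List.map_cons, specAt, dAfter]
    split_ifs <;> exact ih _ _

theorem fAt_append (k : Int) (sp sp' : List (Int × Int × Option Int)) :
    fAt k (sp ++ sp') = fAt k sp ++ fAt k sp' := by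
  simp [fAt, List.filter_append]

theorem fAt_single (k depth start : Int) (e : Option Int) :
    fAt k [(depth, start, e)] = if depth = k then [(start, e)] else [] := by
  by_cases h : depth = k <;> simp [fAt, h]

theorem pvSetLast_ne_nil (acc : List (Int × Option Int)) (v : Int) (h : acc ≠ []) :
    pvSetLast acc v ≠ [] := by
  match acc with
  | [(s, e)] => simp [pvSetLast]
  | x :: y :: t => simp [pvSetLast]

theorem specAt_ne_nil_mono (k : Int) : ∀ (es : List (Int × Char)) (d : Int)
    (acc : List (Int × Option Int)), acc ≠ [] → specAt k es d acc ≠ [] := by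
  intro es
  induction es with
  | nil => intro d acc h; exact h
  | cons p rest ih =>
    obtain ⟨i, ch⟩ := p
    intro d acc h
    simp only [specAt]
    by_cases h1 : ch = '('
    · rw [if_pos h1]
      by_cases hk : d + 1 = k
      · rw [if_pos hk]; exact ih _ _ (by simp)
      · rw [if_neg hk]; exact ih _ _ h
    · by_cases h2 : ch = ')'
      · rw [if_neg h1, if_pos h2]
        by_cases hk : d = k
        · rw [if_pos hk]; exact ih _ _ (pvSetLast_ne_nil acc (i + 1) h)
        · rw [if_neg hk]; exact ih _ _ h
      · rw [if_neg h1, if_neg h2]; exact ih _ _ h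

-- the step that first reaches depth k appends a record, and records are never removed
theorem specAt_reach (k : Int) : ∀ (es : List (Int × Char)) (d m : Int)
    (acc : List (Int × Option Int)), d < k → m < k → k ≤ pvDMax (es.map (·.2)) d m →
    specAt k es d acc ≠ [] := by
  intro es
  induction es with
  | nil =>
    intro d m acc _ hm hk
    simp only [List.map_nil, pvDMax] at hk
    omega
  | cons p rest ih =>
    obtain ⟨i, ch⟩ := p
    intro d m acc hd hm hk
    simp only [List.map_cons, pvDMax] at hk
    simp only [specAt]
    by_cases h1 : ch = '('
    · rw [if_pos h1] at hk
      rw [if_pos h1]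
      by_cases he : d + 1 = k
      · rw [if_pos he]
        exact specAt_ne_nil_mono k rest (d + 1) _ (by simp)
      · rw [if_neg he]
        exact ih (d + 1) (max m (d + 1)) acc (by omega) (by omega) hk
    · by_cases h2 : ch = ')'
      · rw [if_neg h1, if_pos h2] at hk
        rw [if_neg h1, if_pos h2, if_neg (by omega : ¬d = k)]
        exact ih (d - 1) m acc (by omega) hm hk
      · rw [if_neg h1, if_neg h2] at hk
        rw [if_neg h1, if_neg h2]
        exact ih d m acc hd hm hk

theorem specAt_nil_of_nonpos (k : Int) : ∀ (es : List (Int × Char)) (d : Int), k ≤ 0 → 0 ≤ d →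
    pvBal (es.map (·.2)) d = true → specAt k es d [] = [] := by
  intro es
  induction es with
  | nil => intro d _ _ _; rfl
  | cons p rest ih =>
    obtain ⟨i, ch⟩ := p
    intro d hk hd hbal
    simp only [List.map_cons, pvBal] at hbal
    simp only [specAt]
    by_cases h1 : ch = '('
    · rw [if_pos h1] at hbal
      rw [if_pos h1, if_neg (by omega : ¬d + 1 = k)]
      exact ih (d + 1) hk (by omega) hbal
    · by_cases h2 : ch = ')'
      · rw [if_neg h1, if_pos h2] at hbal
        simp only [Bool.and_eq_true, decide_eq_true_eq] at hbal
        rw [if_neg h1, if_pos h2, if_neg (by omega : ¬d = k)]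
        exact ih (d - 1) hk (by omega) hbal.2
      · rw [if_neg h1, if_neg h2] at hbal
        rw [if_neg h1, if_neg h2]
        exact ih d hk hd hbal

theorem specAt_nil_of_gt (k : Int) : ∀ (es : List (Int × Char)) (d m : Int),
    pvDMax (es.map (·.2)) d m = m → d ≤ m → m < k → specAt k es d [] = [] := by
  intro es
  induction es with
  | nil => intro d m _ _ _; rfl
  | cons p rest ih =>
    obtain ⟨i, ch⟩ := p
    intro d m hb hd hm
    simp only [List.map_cons, pvDMax] at hb
    simp only [specAt]
    by_cases h1 : ch = '('
    · rw [if_pos h1] at hb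
      have hle : d + 1 ≤ m := by
        have h := pvDMax_ge (rest.map (·.2)) (d + 1) (max m (d + 1))
        rw [hb] at h
        have := le_max_right m (d + 1)
        omega
      have hmax : max m (d + 1) = m := by omega
      rw [hmax] at hb
      rw [if_pos h1, if_neg (by omega : ¬d + 1 = k)]
      exact ih (d + 1) m hb hle hm
    · by_cases h2 : ch = ')'
      · rw [if_neg h1, if_pos h2] at hb
        rw [if_neg h1, if_pos h2, if_neg (by omega : ¬d = k)]
        exact ih (d - 1) m hb (by omega) hm
      · rw [if_neg h1, if_neg h2] at hb
        rw [if_neg h1, if_neg h2]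
        exact ih d m hb hd hm

theorem mem_fst_iff_fAt (sp : List (Int × Int × Option Int)) (d : Int) :
    d ∈ sp.map (fun r => r.1) ↔ fAt d sp ≠ [] := by
  constructor
  · intro h hnil
    obtain ⟨r, hr, hrd⟩ := List.mem_map.1 h
    have hmem : r ∈ sp.filter (fun r => r.1 == d) :=
      List.mem_filter.2 ⟨hr, by simp [hrd]⟩
    rw [fAt, List.map_eq_nil_iff] at hnil
    rw [hnil] at hmem
    simp at hmem
  · intro h
    have hf : sp.filter (fun r => r.1 == d) ≠ [] := by
      intro hh
      exact h (by rw [fAt, hh]; rfl)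
    obtain ⟨r, hr⟩ := List.exists_mem_of_ne_nil _ hf
    have hm := List.mem_filter.1 hr
    exact List.mem_map.2 ⟨r, hm.1, by simpa using hm.2⟩

-- the core invariant of B's recursive group walker, by strong induction on the suffix length:
-- the records it appends are exactly A's per-depth histories over the consumed segment
theorem grp_main : ∀ (n : Nat) (es : List (Int × Char)), es.length ≤ n →
    ∀ (depth start : Int) (spans : List (Int × Int × Option Int)),
    ∃ pre, es = pre ++ (grp es depth start spans).2.val ∧
      ((grp es depth start spans).2.val = [] ∨ dAfter (pre.map (·.2)) depth = depth - 1) ∧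
      (∀ k, fAt k (grp es depth start spans).1 =
        specAt k pre depth
          (fAt k spans ++ if depth = k then [(start, (none : Option Int))] else [])) ∧
      (∀ (k : Int) (acc : List (Int × Option Int)), k < depth → specAt k pre depth acc = acc) := by
  intro n
  induction n with
  | zero =>
    intro es hlen depth start spans
    have hes : es = [] := List.length_eq_zero_iff.1 (Nat.le_zero.1 hlen)
    subst hes
    refine ⟨[], by simp [grp], Or.inl (by simp [grp]), ?_, fun k acc _ => rfl⟩
    intro k
    by_cases h : depth = k <;> simp [grp, specAt, fAt_append, fAt_single, h]
  | succ n ih =>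
    intro es hlen depth start spans
    match es with
    | [] =>
      refine ⟨[], by simp [grp], Or.inl (by simp [grp]), ?_, fun k acc _ => rfl⟩
      intro k
      by_cases h : depth = k <;> simp [grp, specAt, fAt_append, fAt_single, h]
    | (i, ch) :: rest =>
      simp only [List.length_cons, Nat.succ_le_succ_iff] at hlen
      by_cases h2 : ch = ')'
      · subst h2
        have hgrp1 : (grp ((i, ')') :: rest) depth start spans).1 =
            spans ++ [(depth, start, some (i + 1))] := by
          simp [grp]
        have hgrp2 : ((grp ((i, ')') :: rest) depth start spans).2 : List (Int × Char)) =
            rest := by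
          simp [grp]
        refine ⟨[(i, ')')], ?_, ?_, ?_, ?_⟩
        · rw [hgrp2]
          rfl
        · exact Or.inr (by simp [dAfter])
        · intro k
          rw [hgrp1]
          rw [fAt_append, fAt_single]
          by_cases h : depth = k
          · subst h
            simp only [specAt, Char.reduceEq, reduceIte]
            rw [pvSetLast_append_singleton]
          · simp only [specAt, Char.reduceEq, reduceIte, if_neg h]
        · intro k acc hk
          simp only [specAt, Char.reduceEq, reduceIte]
          rw [if_neg (by omega : ¬depth = k)]
      · by_cases h1 : ch = '('
        · subst h1
          obtain ⟨pre1, hsplit1, hdA1, heq1, hinv1⟩ := ih rest hlen (depth + 1) i spans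
          rcases hq1 : grp rest (depth + 1) i spans with ⟨sp1, r1, hr1⟩
          rw [hq1] at hsplit1 hdA1 heq1
          simp only at hsplit1 hdA1 heq1
          obtain ⟨pre2, hsplit2, hdA2, heq2, hinv2⟩ :=
            ih r1 (le_trans hr1 hlen) depth start sp1
          rcases hq2 : grp r1 depth start sp1 with ⟨sp2, r2, hr2⟩
          rw [hq2] at hsplit2 hdA2 heq2
          simp only at hsplit2 hdA2 heq2
          have hgrp1 : (grp ((i, '(') :: rest) depth start spans).1 = sp2 := by
            simp only [grp, Char.reduceEq, reduceIte]
            rw [hq1]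
            dsimp only
            rw [hq2]
          have hgrp2 : ((grp ((i, '(') :: rest) depth start spans).2 : List (Int × Char)) =
              r2 := by
            simp only [grp, Char.reduceEq, reduceIte]
            rw [hq1]
            dsimp only
            rw [hq2]
          have hdApre1 : pre2 = [] ∨ dAfter (pre1.map (·.2)) (depth + 1) = depth := by
            rcases hdA1 with h | h
            · left
              rw [h] at hsplit2
              rcases List.append_eq_nil_iff.1 hsplit2.symm with ⟨hp2, _⟩
              exact hp2
            · right
              simpa using h
          refine ⟨(i, '(') :: pre1 ++ pre2, ?_, ?_, ?_, ?_⟩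
          · rw [hgrp2]
            simp only [List.cons_append, List.append_assoc]
            rw [← hsplit2, ← hsplit1]
          · rw [hgrp2]
            by_cases hr2n : r2 = []
            · exact Or.inl hr2n
            · refine Or.inr ?_
              have hr1n : r1 ≠ [] := by
                intro h
                rw [h] at hsplit2
                rcases List.append_eq_nil_iff.1 hsplit2.symm with ⟨_, hv2⟩
                exact hr2n hv2
              have hdA1' := hdA1.resolve_left hr1n
              have hdA2' := hdA2.resolve_left hr2n
              simp only [List.cons_append, List.map_cons, List.map_append, dAfter,
                Char.reduceEq, reduceIte]
              rw [dAfter_append]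
              have hA1 : dAfter (List.map (·.2) pre1) (depth + 1) = depth := by
                simpa using hdA1'
              rw [hA1]
              exact hdA2'
          · intro k
            rw [hgrp1]
            -- RHS: the '(' event, then pre1 (the nested group), then pre2 (the rest of the body)
            have hrhs : specAt k ((i, '(') :: pre1 ++ pre2) depth
                (fAt k spans ++ if depth = k then [(start, (none : Option Int))] else []) =
                specAt k pre2 (dAfter (pre1.map (·.2)) (depth + 1))
                  (specAt k pre1 (depth + 1)
                    ((fAt k spans ++ if depth = k then [(start, (none : Option Int))] else []) ++
                      if depth + 1 = k then [(i, (none : Option Int))] else [])) := by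
              simp only [List.cons_append, specAt, Char.reduceEq, reduceIte]
              rw [specAt_append]
              by_cases hk : depth + 1 = k <;> simp [hk]
            rw [hrhs]
            by_cases hk : depth = k
            · -- k = depth: no depth-k event inside the nested group or the body; the open
              -- (start, none) marker rides through and the body's own close handles it
              subst hk
              have hq1fAt : fAt depth sp1 = fAt depth spans := by
                have h := heq1 depth
                rw [if_neg (by omega), List.append_nil] at h
                rw [h]
                exact hinv1 depth _ (by omega)
              have hpre1inv : specAt depth pre1 (depth + 1)
                  ((fAt depth spans ++ [(start, (none : Option Int))]) ++
                    if depth + 1 = depth then [(i, (none : Option Int))] else []) =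
                  fAt depth spans ++ [(start, (none : Option Int))] := by
                rw [if_neg (by omega), List.append_nil]
                exact hinv1 depth _ (by omega)
              rw [if_pos rfl, hpre1inv]
              rcases hdApre1 with hp2 | hdA
              · subst hp2
                have h := heq2 depth
                rw [if_pos rfl, hq1fAt] at h
                simpa [specAt] using h
              · rw [hdA]
                have h := heq2 depth
                rw [if_pos rfl, hq1fAt] at h
                exact h
            · -- k ≠ depth: the markers are empty at this level; chain the two IH equations
              have h1eq : specAt k pre1 (depth + 1)
                  ((fAt k spans ++ if depth = k then [(start, (none : Option Int))] else []) ++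
                    if depth + 1 = k then [(i, (none : Option Int))] else []) = fAt k sp1 := by
                rw [if_neg hk, List.append_nil]
                exact (heq1 k).symm
              rw [h1eq]
              rcases hdApre1 with hp2 | hdA
              · subst hp2
                have h := heq2 k
                rw [if_neg hk, List.append_nil] at h
                simpa [specAt] using h
              · rw [hdA]
                have h := heq2 k
                rw [if_neg hk, List.append_nil] at h
                exact h
          · intro k acc hk
            simp only [List.cons_append, specAt, Char.reduceEq, reduceIte,
              if_neg (by omega : ¬depth + 1 = k)]
            rw [specAt_append, hinv1 k acc (by omega)]
            rcases hdApre1 with hp2 | hdA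
            · subst hp2
              simp [specAt]
            · rw [hdA]
              exact hinv2 k acc hk
        · -- any other character: skip it
          obtain ⟨pre', hsplit, hdA, heq, hinv⟩ := ih rest hlen depth start spans
          rcases hq : grp rest depth start spans with ⟨sp1, r1, hr1⟩
          rw [hq] at hsplit hdA heq
          simp only at hsplit hdA heq
          have hgrp1 : (grp ((i, ch) :: rest) depth start spans).1 = sp1 := by
            simp [grp, h1, h2, hq]
          have hgrp2 : ((grp ((i, ch) :: rest) depth start spans).2 : List (Int × Char)) =
              r1 := by
            simp [grp, h1, h2, hq]
          refine ⟨(i, ch) :: pre', ?_, ?_, ?_, ?_⟩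
          · rw [hgrp2]
            simp only [List.cons_append]
            rw [← hsplit]
          · rw [hgrp2]
            rcases hdA with h | h
            · exact Or.inl h
            · exact Or.inr (by
                simp only [List.map_cons, dAfter, if_neg h1, if_neg h2]
                exact h)
          · intro k
            rw [hgrp1]
            simp only [specAt, if_neg h1, if_neg h2]
            exact heq k
          · intro k acc hk
            simp only [specAt, if_neg h1, if_neg h2]
            exact hinv k acc hk

-- the top-level loop: under non-negative prefix balances it returns, and its records are A's histories
theorem topWalk_main : ∀ (n : Nat) (es : List (Int × Char)), es.length ≤ n →
    ∀ (spans : List (Int × Int × Option Int)), pvBal (es.map (·.2)) 0 = true →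
    ∃ sp', topWalk es spans = some sp' ∧ ∀ k, fAt k sp' = specAt k es 0 (fAt k spans) := by
  intro n
  induction n with
  | zero =>
    intro es hlen spans _
    have hes : es = [] := List.length_eq_zero_iff.1 (Nat.le_zero.1 hlen)
    subst hes
    exact ⟨spans, by simp [topWalk], fun k => rfl⟩
  | succ n ih =>
    intro es hlen spans hbal
    match es with
    | [] => exact ⟨spans, by simp [topWalk], fun k => rfl⟩
    | (i, ch) :: rest =>
      simp only [List.length_cons, Nat.succ_le_succ_iff] at hlen
      simp only [List.map_cons, pvBal] at hbal
      by_cases h1 : ch = '('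
      · subst h1
        rw [if_pos rfl] at hbal
        simp only [zero_add] at hbal
        obtain ⟨pre1, hsplit, hdA, heq1, hinv1⟩ := grp_main rest.length rest le_rfl 1 i spans
        rcases hq : grp rest 1 i spans with ⟨sp1, r1, hr1⟩
        rw [hq] at hsplit hdA heq1
        simp only at hsplit hdA heq1
        have htop : topWalk ((i, '(') :: rest) spans = topWalk r1 sp1 := by
          simp [topWalk, hq]
        have hacc : ∀ (k : Int) (acc : List (Int × Option Int)),
            specAt k ((i, '(') :: rest) 0 acc =
            specAt k r1 (dAfter (pre1.map (·.2)) 1)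
              (specAt k pre1 1 (acc ++ if (1 : Int) = k then [(i, (none : Option Int))] else [])) := by
          intro k acc
          conv_lhs => rw [hsplit]
          simp only [specAt, Char.reduceEq, reduceIte, zero_add]
          rw [specAt_append]
          by_cases hk : (1 : Int) = k <;> simp [hk]
        by_cases hr : r1 = []
        · refine ⟨sp1, by rw [htop, hr]; simp [topWalk], ?_⟩
          intro k
          rw [hacc k (fAt k spans), hr]
          exact heq1 k
        · have hdA' : dAfter (pre1.map (·.2)) 1 = 0 := by
            have h := hdA.resolve_left hr
            simpa using h
          have hbal2 : pvBal (r1.map (·.2)) 0 = true := by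
            rw [hsplit, List.map_append, pvBal_append, hdA', Bool.and_eq_true] at hbal
            exact hbal.2
          have hlen2 : r1.length ≤ n := le_trans hr1 hlen
          obtain ⟨sp', htw', heq'⟩ := ih r1 hlen2 sp1 hbal2
          refine ⟨sp', by rw [htop]; exact htw', ?_⟩
          intro k
          rw [hacc k (fAt k spans), hdA', ← heq1 k]
          exact heq' k
      · by_cases h2 : ch = ')'
        · subst h2
          rw [if_neg h1, if_pos rfl] at hbal
          simp only [Bool.and_eq_true, decide_eq_true_eq] at hbal
          omega
        · rw [if_neg h1, if_neg h2] at hbal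
          obtain ⟨sp', htw, heq⟩ := ih rest hlen spans hbal
          refine ⟨sp', ?_, ?_⟩
          · simp only [topWalk, if_neg h1, if_neg h2]
            exact htw
          · intro k
            simp only [specAt, if_neg h1, if_neg h2]
            exact heq k

-- ===== VERDICT (by name: the statement is the Claim_ definition above) =====
theorem innermost_spec : Claim_equal_innermost := by
  intro ex _ hpre
  obtain ⟨hpref, -⟩ := hpre
  have hbal : pvBal ex.toList 0 = true := by
    refine pvBal_of ex.toList 0 (le_refl 0) ?_
    intro n hn
    simpa using hpref n hn
  unfold Spec_innermost innermost innermost_alt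
  have hmap : (PySem.List.enumerate ex.toList).map (·.2) = ex.toList :=
    PySem.List.map_snd_enumerate ..
  have hM0 : (0 : Int) ≤ pvDMax ex.toList 0 0 := pvDMax_ge ex.toList 0 0
  have hkeys : (loopA (PySem.List.enumerate ex.toList) PySem.Dict.empty 0).1.keys =
      krI (pvDMax ex.toList 0 0) := by
    have := lemA_keys (PySem.List.enumerate ex.toList) 0 0 PySem.Dict.empty
      (by rw [hmap]; exact hbal) (by simp [krI]) (le_refl 0) (le_refl 0)
    rwa [hmap] at this
  obtain ⟨sp', htw, heqk⟩ := topWalk_main (PySem.List.enumerate ex.toList).length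
    (PySem.List.enumerate ex.toList) le_rfl [] (by rw [hmap]; exact hbal)
  rw [htw]
  have heqk' : ∀ k, fAt k sp' = specAt k (PySem.List.enumerate ex.toList) 0 [] := by
    intro k
    simpa [fAt] using heqk k
  have hbound : ∀ d, d ∈ sp'.map (fun r => r.1) → 1 ≤ d ∧ d ≤ pvDMax ex.toList 0 0 := by
    intro d hd
    have hne := (mem_fst_iff_fAt sp' d).1 hd
    rw [heqk' d] at hne
    constructor
    · by_contra hc
      exact hne (specAt_nil_of_nonpos d _ 0 (by omega) (le_refl 0) (by rw [hmap]; exact hbal))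
    · by_contra hc
      exact hne (specAt_nil_of_gt d _ 0 (pvDMax ex.toList 0 0)
        (by rw [hmap]; exact pvDMax_idem ex.toList) hM0 (by omega))
  by_cases hMz : pvDMax ex.toList 0 0 = 0
  · have hsp : sp' = [] := by
      cases hspc : sp' with
      | nil => rfl
      | cons r t =>
        exfalso
        have := hbound r.1 (by rw [hspc]; exact List.mem_map.2 ⟨r, List.mem_cons_self .., rfl⟩)
        omega
    simp only [hkeys, hMz, hsp]
    simp [krI, PySem.List.max?]
  · have hM1 : (1 : Int) ≤ pvDMax ex.toList 0 0 := by omega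
    have hMne : fAt (pvDMax ex.toList 0 0) sp' ≠ [] := by
      rw [heqk']
      exact specAt_reach (pvDMax ex.toList 0 0) (PySem.List.enumerate ex.toList) 0 0 []
        (by omega) (by omega) (by rw [hmap])
    have hMmem : pvDMax ex.toList 0 0 ∈ sp'.map (fun r => r.1) :=
      (mem_fst_iff_fAt sp' (pvDMax ex.toList 0 0)).2 hMne
    have hspne : sp' ≠ [] := by
      intro h
      rw [h] at hMmem
      simp at hMmem
    have hmaxB : PySem.List.max? (sp'.map (fun r => r.1)) (fun d => d) =
        some (pvDMax ex.toList 0 0) := by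
      cases hmax : PySem.List.max? (sp'.map (fun r => r.1)) (fun d => d) with
      | none =>
        rw [PySem.List.max?_eq_none_iff] at hmax
        rw [hmax] at hMmem
        simp at hMmem
      | some x =>
        have hx := PySem.List.max?_mem hmax
        have hxle := (hbound x hx).2
        have hmle := PySem.List.max?_isMax hmax _ hMmem
        congr 1
        omega
    have hA : (loopA (PySem.List.enumerate ex.toList) PySem.Dict.empty 0).1.getD
        (pvDMax ex.toList 0 0) [] =
        specAt (pvDMax ex.toList 0 0) (PySem.List.enumerate ex.toList) 0 [] := by
      rw [lemA_getD]
      simp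
    simp only [hkeys, max?_krI hM1, hA, ← heqk', if_neg hspne, hmaxB]
    simp only [fAt, List.map_map]
    rfl
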